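-- pv_equiv track=rewrite | github.com/phongphung/Self_misc_crawler | PRO-1046_alphasense/google_search.py | rotate_keys
-- ===== SOURCE A (Python) =====
-- def rotate_keys(google_keys):
--     """
--     Disble current key.
--     Return next available key.
--     """
--     for key in google_keys:
--         if key['status'] == 1:
--             key['status'] = -1
--
--     for idx, key in enumerate(google_keys):
--         if key['status'] == 0:
--             key['status'] = 1
--             return idx
--     return None
-- ===== SOURCE B (Python) =====
-- def rotate_keys(google_keys):
--     """Single fused pass: disable every active key and remember the first
--     available one; activate it only after the loop (return-value equivalent
--     to the two-loop original; same in-place mutations)."""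
--     first = None
--     for idx, key in enumerate(google_keys):
--         if key['status'] == 1:
--             key['status'] = -1
--         if first is None and key['status'] == 0:
--             first = idx
--     if first is not None:
--         google_keys[first]['status'] = 1
--     return first
-- ===== Notes on version B (the rewrite author's own statement) =====
-- stated objective: alternative
-- what changed: The two sequential scans (disable-all, then find-and-activate with an early return) are fused into one enumerate pass that records the first available index without returning early, activating it after the loop.
import Mathlib
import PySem

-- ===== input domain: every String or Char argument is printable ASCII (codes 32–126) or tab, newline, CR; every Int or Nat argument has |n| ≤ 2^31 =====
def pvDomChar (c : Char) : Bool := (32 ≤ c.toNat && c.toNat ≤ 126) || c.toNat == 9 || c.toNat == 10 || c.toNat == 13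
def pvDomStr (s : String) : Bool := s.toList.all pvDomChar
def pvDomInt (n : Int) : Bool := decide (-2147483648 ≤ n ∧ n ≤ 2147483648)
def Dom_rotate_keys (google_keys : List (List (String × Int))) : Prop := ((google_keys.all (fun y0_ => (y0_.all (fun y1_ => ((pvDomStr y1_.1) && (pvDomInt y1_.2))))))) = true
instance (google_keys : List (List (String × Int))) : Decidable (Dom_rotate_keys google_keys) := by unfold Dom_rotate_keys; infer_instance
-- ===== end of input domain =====

-- B fuses A's two scans into one enumerate pass that records the first available
-- index and activates it after the loop ("alternative"); A and B mutate the
-- dicts in place identically, and the equivalence proved here is about the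
-- RETURN value.

-- ===== PORT A =====
-- first loop: key['status'] = -1 on every key whose status is 1
def rotateA_disable (key : List (String × Int)) : List (String × Int) :=
  if (PySem.Dict.mk key).get? "status" = some 1 then
    ((PySem.Dict.mk key).insert "status" (-1)).items
  else key

-- second loop: return the first idx with key['status'] == 0 (the in-place
-- activation key['status'] = 1 does not affect the return value)
def rotateA_find (keys : List (List (String × Int))) (idx : Int) : Option Int :=
  match keys with
  | [] => none
  | key :: rest =>
    if (PySem.Dict.mk key).get? "status" = some 0 then some idx
    else rotateA_find rest (idx + 1)

def rotate_keys (google_keys : List (List (String × Int))) : Option Int :=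
  rotateA_find (google_keys.map rotateA_disable) 0

-- ===== PORT B =====
-- one fused pass; state = (idx, first)
def rotateB_step (st : Int × Option Int) (key : List (String × Int)) : Int × Option Int :=
  let key' := if (PySem.Dict.mk key).get? "status" = some 1 then
                ((PySem.Dict.mk key).insert "status" (-1)).items
              else key
  (st.1 + 1,
   if st.2 = none ∧ (PySem.Dict.mk key').get? "status" = some 0 then some st.1 else st.2)

def rotate_keys_alt (google_keys : List (List (String × Int))) : Option Int :=
  (google_keys.foldl rotateB_step (0, none)).2

-- ===== PRECONDITION & SPEC =====
-- Pre_ excludes exactly the inputs where key['status'] raises KeyError in both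
-- Pythons: some key dict has no "status" entry.
def Pre_rotate_keys (google_keys : List (List (String × Int))) : Prop :=
  ∀ key ∈ google_keys, ((PySem.Dict.mk key).get? "status").isSome = true
instance (google_keys : List (List (String × Int))) : Decidable (Pre_rotate_keys google_keys) := by unfold Pre_rotate_keys; infer_instance

def pvWitness_rotate_keys : (List (List (String × Int))) :=
  [[("status", 1)], [("status", -1)], [("status", 0)]]

def Spec_rotate_keys (google_keys : List (List (String × Int))) (out : Option Int) : Prop := out = rotate_keys_alt google_keys
instance (google_keys : List (List (String × Int))) (out : Option Int) : Decidable (Spec_rotate_keys google_keys out) := by unfold Spec_rotate_keys; infer_instance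

-- ===== CLAIM (what is proved, stated in full; the proofs are below) =====
def Claim_equal_rotate_keys : Prop := ∀ (google_keys : List (List (String × Int))), Dom_rotate_keys google_keys → Pre_rotate_keys google_keys → Spec_rotate_keys google_keys (rotate_keys google_keys)

-- ===== LEMMAS AND PROOFS =====

-- once B's accumulator is set, the rest of the fold keeps it
lemma foldB_some (keys : List (List (String × Int))) (i v : Int) :
    (keys.foldl rotateB_step (i, some v)).2 = some v := by
  induction keys generalizing i with
  | nil => rfl
  | cons k rest ih => simpa [rotateB_step] using ih (i + 1)

-- the heart: A's scan of the disabled list = B's fused fold, for any start index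
lemma find_eq_fold (keys : List (List (String × Int))) (i : Int) :
    rotateA_find (keys.map rotateA_disable) i = (keys.foldl rotateB_step (i, none)).2 := by
  induction keys generalizing i with
  | nil => rfl
  | cons k rest ih =>
    by_cases h : (PySem.Dict.mk (rotateA_disable k)).get? "status" = some 0
    · simp only [List.map_cons, rotateA_find, List.foldl_cons, rotateA_disable, rotateB_step] at h ⊢
      rw [if_pos h, if_pos (by exact ⟨trivial, h⟩), foldB_some]
    · simp only [List.map_cons, rotateA_find, List.foldl_cons, rotateA_disable, rotateB_step] at h ⊢
      rw [if_neg h, if_neg (by simp [h]), ih]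

-- ===== VERDICT (by name: the statement is the Claim_ definition above) =====
theorem rotate_keys_spec : Claim_equal_rotate_keys := by
  intro gk _ _
  unfold Spec_rotate_keys rotate_keys rotate_keys_alt
  exact find_eq_fold gk 0
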